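-- pv_equiv track=rewrite | github.com/lsst-sqre/sasquatch | src/sasquatch/line_protocol.py | _extract_measurement_and_tag_keys
-- ===== SOURCE A (Python) =====
-- def _unescape(value: str) -> str:
--     """Unescape line protocol identifier content."""
--     result: list[str] = []
--     escaped = False
--
--     for char in value:
--         if escaped:
--             result.append(char)
--             escaped = False
--             continue
--         if char == "\\":
--             escaped = True
--             continue
--         result.append(char)
--
--     if escaped:
--         result.append("\\")
--
--     return "".join(result)
--
-- def _unescape_if_needed(value: str) -> str:
--     """Unescape a value only when it contains escapes."""
--     return _unescape(value) if "\\" in value else value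
--
-- def _is_metadata_line(line: str) -> bool:
--     """Return whether a line is header metadata, not line protocol data."""
--     stripped = line.strip()
--     return not stripped or stripped.startswith(("#", "CREATE "))
--
-- def _extract_measurement_and_tag_keys(  # noqa: C901, PLR0912, PLR0915
--     line: str,
-- ) -> tuple[str, set[str]] | None:
--     """Extract a measurement name and tag keys with one pass over the line."""
--     if _is_metadata_line(line):
--         return None
--
--     measurement_chars: list[str] = []
--     tag_keys: set[str] = set()
--     tag_key_chars: list[str] = []
--     escaped = False
--     in_tag_key = False
--     in_tag_value = False
--
--     for char in line:
--         if escaped: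
--             if in_tag_key:
--                 tag_key_chars.append(char)
--             elif not in_tag_value:
--                 measurement_chars.append(char)
--             escaped = False
--             continue
--
--         if char == "\\":
--             escaped = True
--             if in_tag_key:
--                 tag_key_chars.append(char)
--             elif not in_tag_value:
--                 measurement_chars.append(char)
--             continue
--
--         if in_tag_value:
--             if char == ",":
--                 in_tag_value = False
--                 in_tag_key = True
--                 tag_key_chars = []
--                 continue
--             if char == " ":
--                 break
--             continue
--
--         if in_tag_key:
--             if char == "=":
--                 tag_keys.add(_unescape_if_needed("".join(tag_key_chars)))
--                 in_tag_key = False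
--                 in_tag_value = True
--                 continue
--             if char == ",":
--                 tag_key_chars = []
--                 continue
--             if char == " ":
--                 break
--             tag_key_chars.append(char)
--             continue
--
--         if char == ",":
--             in_tag_key = True
--             continue
--         if char == " ":
--             break
--         measurement_chars.append(char)
--
--     if not measurement_chars:
--         return None
--
--     measurement = _unescape_if_needed("".join(measurement_chars))
--     return measurement, tag_keys
-- ===== SOURCE B (Python) =====
-- def _unescape(value: str) -> str:
--     """Unescape line protocol identifier content."""
--     result: list[str] = []
--     escaped = False
--
--     for char in value:
--         if escaped:
--             result.append(char)
--             escaped = False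
--             continue
--         if char == "\\":
--             escaped = True
--             continue
--         result.append(char)
--
--     if escaped:
--         result.append("\\")
--
--     return "".join(result)
--
--
-- def _unescape_if_needed(value: str) -> str:
--     """Unescape a value only when it contains escapes."""
--     return _unescape(value) if "\\" in value else value
--
--
-- def _is_metadata_line(line: str) -> bool:
--     """Return whether a line is header metadata, not line protocol data."""
--     stripped = line.strip()
--     return not stripped or stripped.startswith(("#", "CREATE "))
--
--
-- def _scan_before_space(line: str) -> str:
--     """Return the characters before the first unescaped space."""
--     out: list[str] = []
--     escaped = False
--     for char in line:
--         if escaped: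
--             out.append(char)
--             escaped = False
--         elif char == "\\":
--             out.append(char)
--             escaped = True
--         elif char == " ":
--             break
--         else:
--             out.append(char)
--     return "".join(out)
--
--
-- def _split_unescaped(text: str, sep: str) -> list[str]:
--     """Split text at every unescaped occurrence of sep."""
--     parts: list[str] = []
--     current: list[str] = []
--     escaped = False
--     for char in text:
--         if escaped:
--             current.append(char)
--             escaped = False
--         elif char == "\\":
--             current.append(char)
--             escaped = True
--         elif char == sep:
--             parts.append("".join(current))
--             current = []
--         else:
--             current.append(char)
--     parts.append("".join(current))
--     return parts
--
--
-- def _extract_measurement_and_tag_keys(line: str) -> tuple[str, set[str]] | None: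
--     """Extract a measurement name and tag keys by splitting at unescaped delimiters."""
--     if _is_metadata_line(line):
--         return None
--
--     measurement_raw, *segments = _split_unescaped(_scan_before_space(line), ",")
--     if not measurement_raw:
--         return None
--
--     tag_keys: set[str] = set()
--     for segment in segments:
--         parts = _split_unescaped(segment, "=")
--         if len(parts) > 1:
--             tag_keys.add(_unescape_if_needed(parts[0]))
--
--     return _unescape_if_needed(measurement_raw), tag_keys
-- ===== Notes on version B (the rewrite author's own statement) =====
-- stated objective: simpler
-- what changed: Replaces A's six-variable single-pass state machine by a plain decomposition: scan the escape-aware prefix before the first unescaped space, split it at unescaped commas, take the first part as the measurement, and for each remaining segment take the part before its first unescaped equals sign as a tag key.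
import Mathlib
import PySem

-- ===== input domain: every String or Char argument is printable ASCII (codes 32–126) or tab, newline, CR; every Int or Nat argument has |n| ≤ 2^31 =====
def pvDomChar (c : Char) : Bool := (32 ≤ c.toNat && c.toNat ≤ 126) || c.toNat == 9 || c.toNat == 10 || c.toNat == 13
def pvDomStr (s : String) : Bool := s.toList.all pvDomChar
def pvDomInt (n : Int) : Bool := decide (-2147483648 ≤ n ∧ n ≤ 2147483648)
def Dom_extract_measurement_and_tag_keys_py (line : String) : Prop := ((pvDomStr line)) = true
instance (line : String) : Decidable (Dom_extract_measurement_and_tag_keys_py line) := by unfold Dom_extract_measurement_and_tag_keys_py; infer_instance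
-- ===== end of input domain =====

-- B replaces A's six-variable state machine by one escape-aware before-space scan plus escape-aware
-- splits at unescaped ',' and '=' (simpler decomposition; no speed claim).

-- ===== PORT A =====
-- shared module helpers, used verbatim by both Python versions
-- _unescape: loop with `escaped` flag, result list built by append
def pvUnescapeLoop : List Char → Bool → List Char → List Char
  | [], escaped, result => if escaped then result ++ ['\\'] else result
  | c :: rest, true, result => pvUnescapeLoop rest false (result ++ [c])
  | c :: rest, false, result =>
      if c = '\\' then pvUnescapeLoop rest true result
      else pvUnescapeLoop rest false (result ++ [c])

def pvUnescape (value : String) : String :=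
  String.ofList (pvUnescapeLoop value.toList false [])

def pvUnescapeIfNeeded (value : String) : String :=
  if PySem.Str.isIn "\\" value then pvUnescape value else value

def pvIsMetadataLine (line : String) : Bool :=
  let stripped := PySem.Str.strip line
  stripped = "" || PySem.Str.startswith stripped "#" || PySem.Str.startswith stripped "CREATE "

-- A's single for-loop; state = (escaped, in_tag_key, in_tag_value, measurement_chars, tag_keys, tag_key_chars)
def pvALoop : List Char → Bool → Bool → Bool → List Char → PySem.Set String → List Char →
    (List Char × PySem.Set String)
  | [], _, _, _, mc, tk, _ => (mc, tk)
  | c :: rest, escaped, itk, itv, mc, tk, kc =>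
    if escaped then
      if itk then pvALoop rest false itk itv mc tk (kc ++ [c])
      else if !itv then pvALoop rest false itk itv (mc ++ [c]) tk kc
      else pvALoop rest false itk itv mc tk kc
    else if c = '\\' then
      if itk then pvALoop rest true itk itv mc tk (kc ++ [c])
      else if !itv then pvALoop rest true itk itv (mc ++ [c]) tk kc
      else pvALoop rest true itk itv mc tk kc
    else if itv then
      if c = ',' then pvALoop rest false true false mc tk []
      else if c = ' ' then (mc, tk)
      else pvALoop rest false itk itv mc tk kc
    else if itk then
      if c = '=' then
        pvALoop rest false false true mc
          (PySem.Set.add tk (pvUnescapeIfNeeded (String.ofList kc))) kc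
      else if c = ',' then pvALoop rest false itk itv mc tk []
      else if c = ' ' then (mc, tk)
      else pvALoop rest false itk itv mc tk (kc ++ [c])
    else
      if c = ',' then pvALoop rest false true itv mc tk kc
      else if c = ' ' then (mc, tk)
      else pvALoop rest false itk itv (mc ++ [c]) tk kc

def extract_measurement_and_tag_keys_py (line : String) : Option (String × List String) :=
  if pvIsMetadataLine line then none
  else
    let r := pvALoop line.toList false false false [] PySem.Set.empty []
    if r.1 = [] then none
    else some (pvUnescapeIfNeeded (String.ofList r.1), r.2)

-- ===== PORT B =====
-- _scan_before_space: the characters before the first unescaped space (`out` built by append)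
def pvTakeLoop : List Char → Bool → List Char → List Char
  | [], _, out => out
  | c :: rest, true, out => pvTakeLoop rest false (out ++ [c])
  | c :: rest, false, out =>
      if c = '\\' then pvTakeLoop rest true (out ++ [c])
      else if c = ' ' then out
      else pvTakeLoop rest false (out ++ [c])

-- _split_unescaped: split at every unescaped occurrence of sep (segments kept as List Char where Python joins to str)
def pvSplitLoop (sep : Char) : List Char → Bool → List Char → List (List Char) → List (List Char)
  | [], _, current, parts => parts ++ [current]
  | c :: rest, true, current, parts => pvSplitLoop sep rest false (current ++ [c]) parts
  | c :: rest, false, current, parts =>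
      if c = '\\' then pvSplitLoop sep rest true (current ++ [c]) parts
      else if c = sep then pvSplitLoop sep rest false [] (parts ++ [current])
      else pvSplitLoop sep rest false (current ++ [c]) parts

def pvSplitUnescaped (sep : Char) (text : List Char) : List (List Char) :=
  pvSplitLoop sep text false [] []

-- body of B's `for segment in segments` loop
def pvKeyStep (tk : PySem.Set String) (segment : List Char) : PySem.Set String :=
  match pvSplitUnescaped '=' segment with
  | _ :: [] => tk
  | k :: _ :: _ => PySem.Set.add tk (pvUnescapeIfNeeded (String.ofList k))
  | [] => tk

def extract_measurement_and_tag_keys_py_alt (line : String) : Option (String × List String) :=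
  if pvIsMetadataLine line then none
  else
    match pvSplitUnescaped ',' (pvTakeLoop line.toList false []) with
    | [] => none
    | measurement_raw :: segments =>
      if measurement_raw = [] then none
      else
        some (pvUnescapeIfNeeded (String.ofList measurement_raw),
              segments.foldl pvKeyStep PySem.Set.empty)

-- ===== PRECONDITION & SPEC =====
def Spec_extract_measurement_and_tag_keys_py (line : String) (out : Option (String × List String)) : Prop := out = extract_measurement_and_tag_keys_py_alt line
instance (line : String) (out : Option (String × List String)) : Decidable (Spec_extract_measurement_and_tag_keys_py line out) := by unfold Spec_extract_measurement_and_tag_keys_py; infer_instance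

-- ===== CLAIM (what is proved, stated in full; the proofs are below) =====
def Claim_equal_extract_measurement_and_tag_keys_py : Prop := ∀ (line : String), Dom_extract_measurement_and_tag_keys_py line → Spec_extract_measurement_and_tag_keys_py line (extract_measurement_and_tag_keys_py line)

-- ===== LEMMAS AND PROOFS =====

-- B's composition "split the before-space prefix at unescaped commas", named for the lemmas
def pvC (l : List Char) : List (List Char) :=
  pvSplitUnescaped ',' (pvTakeLoop l false [])

theorem pvTakeLoop_out : ∀ (l : List Char) (esc : Bool) (out : List Char),
    pvTakeLoop l esc out = out ++ pvTakeLoop l esc [] := by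
  intro l
  induction l with
  | nil => intro esc out; cases esc <;> simp [pvTakeLoop]
  | cons c r ih =>
    intro esc out
    cases esc
    · simp only [pvTakeLoop]
      split_ifs
      · rw [ih true (out ++ [c]), ih true ([] ++ [c])]; simp
      · simp
      · rw [ih false (out ++ [c]), ih false ([] ++ [c])]; simp
    · simp only [pvTakeLoop]
      rw [ih false (out ++ [c]), ih false ([] ++ [c])]; simp

theorem pvSplitLoop_shape (sep : Char) : ∀ (l : List Char) (esc : Bool),
    ∃ h t, ∀ cur parts, pvSplitLoop sep l esc cur parts = parts ++ (cur ++ h) :: t := by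
  intro l
  induction l with
  | nil => intro esc; exact ⟨[], [], by intro cur parts; cases esc <;> simp [pvSplitLoop]⟩
  | cons c r ih =>
    intro esc
    cases esc
    · by_cases h1 : c = '\\'
      · obtain ⟨h, t, hw⟩ := ih true
        exact ⟨c :: h, t, by intro cur parts; simp [pvSplitLoop, h1, hw]⟩
      · by_cases h2 : c = sep
        · obtain ⟨h, t, hw⟩ := ih false
          refine ⟨[], h :: t, ?_⟩
          intro cur parts
          subst h2
          simp [pvSplitLoop, h1, hw]
        · obtain ⟨h, t, hw⟩ := ih false
          exact ⟨c :: h, t, by intro cur parts; simp [pvSplitLoop, h1, h2, hw]⟩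
    · obtain ⟨h, t, hw⟩ := ih false
      exact ⟨c :: h, t, by intro cur parts; simp [pvSplitLoop, hw]⟩

-- unfolding pvC one input character at a time
theorem pvC_nil : pvC [] = [[]] := rfl

theorem pvC_space (r : List Char) : pvC (' ' :: r) = [[]] := by
  simp [pvC, pvTakeLoop, pvSplitUnescaped, pvSplitLoop]

theorem pvC_comma (r : List Char) : pvC (',' :: r) = [] :: pvC r := by
  obtain ⟨h, t, hw⟩ := pvSplitLoop_shape ',' (pvTakeLoop r false []) false
  have hT : pvTakeLoop (',' :: r) false [] = ',' :: pvTakeLoop r false [] := by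
    rw [show pvTakeLoop (',' :: r) false [] = pvTakeLoop r false [','] from by simp [pvTakeLoop],
        pvTakeLoop_out r false [',']]
    rfl
  simp only [pvC, pvSplitUnescaped, hT]
  rw [show pvSplitLoop ',' (',' :: pvTakeLoop r false []) false [] []
        = pvSplitLoop ',' (pvTakeLoop r false []) false [] [[]] from by simp [pvSplitLoop],
      hw [] [[]], hw [] []]
  rfl

theorem pvC_bs_nil : pvC ['\\'] = [['\\']] := rfl

theorem pvC_bs (d : Char) (r : List Char) (h : List Char) (t : List (List Char))
    (hr : pvC r = h :: t) : pvC ('\\' :: d :: r) = ('\\' :: d :: h) :: t := by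
  obtain ⟨h0, t0, hw⟩ := pvSplitLoop_shape ',' (pvTakeLoop r false []) false
  have h0e : pvC r = h0 :: t0 := by simpa [pvC, pvSplitUnescaped] using hw [] []
  rw [h0e] at hr
  obtain ⟨h1, h2⟩ : h0 = h ∧ t0 = t := by simpa using hr
  have hT : pvTakeLoop ('\\' :: d :: r) false [] = '\\' :: d :: pvTakeLoop r false [] := by
    rw [show pvTakeLoop ('\\' :: d :: r) false [] = pvTakeLoop r false ['\\', d] from by
          simp [pvTakeLoop],
        pvTakeLoop_out r false ['\\', d]]
    rfl
  simp only [pvC, pvSplitUnescaped, hT]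
  rw [show pvSplitLoop ',' ('\\' :: d :: pvTakeLoop r false []) false [] []
        = pvSplitLoop ',' (pvTakeLoop r false []) false ['\\', d] [] from by simp [pvSplitLoop],
      hw ['\\', d] []]
  simp [h1, h2]

theorem pvC_char (c : Char) (r : List Char) (h : List Char) (t : List (List Char))
    (hc1 : c ≠ '\\') (hc2 : c ≠ ' ') (hc3 : c ≠ ',')
    (hr : pvC r = h :: t) : pvC (c :: r) = (c :: h) :: t := by
  obtain ⟨h0, t0, hw⟩ := pvSplitLoop_shape ',' (pvTakeLoop r false []) false
  have h0e : pvC r = h0 :: t0 := by simpa [pvC, pvSplitUnescaped] using hw [] []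
  rw [h0e] at hr
  obtain ⟨h1, h2⟩ : h0 = h ∧ t0 = t := by simpa using hr
  have hT : pvTakeLoop (c :: r) false [] = c :: pvTakeLoop r false [] := by
    rw [show pvTakeLoop (c :: r) false [] = pvTakeLoop r false [c] from by
          simp [pvTakeLoop, hc1, hc2],
        pvTakeLoop_out r false [c]]
    rfl
  simp only [pvC, pvSplitUnescaped, hT]
  rw [show pvSplitLoop ',' (c :: pvTakeLoop r false []) false [] []
        = pvSplitLoop ',' (pvTakeLoop r false []) false [c] [] from by
          simp [pvSplitLoop, hc1, hc3],
      hw [c] []]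
  simp [h1, h2]

theorem pvC_ne_nil (l : List Char) : ∃ h t, pvC l = h :: t := by
  obtain ⟨h, t, hw⟩ := pvSplitLoop_shape ',' (pvTakeLoop l false []) false
  exact ⟨h, t, by simpa [pvC, pvSplitUnescaped] using hw [] []⟩

-- the invariant A maintains for tag_key_chars: a "transparent" prefix for the '='-split
def pvOkKey (kc : List Char) : Prop :=
  ∀ (m cur : List Char), pvSplitLoop '=' (kc ++ m) false cur [] = pvSplitLoop '=' m false (cur ++ kc) []

theorem pvOkKey_nil : pvOkKey [] := by intro m cur; simp

theorem pvOkKey_snoc (kc : List Char) (c : Char) (hc1 : c ≠ '\\') (hc2 : c ≠ '=')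
    (hk : pvOkKey kc) : pvOkKey (kc ++ [c]) := by
  intro m cur
  have := hk (c :: m) cur
  simp only [List.append_assoc, List.singleton_append] at *
  rw [this]
  simp [pvSplitLoop, hc1, hc2]

theorem pvOkKey_bs (kc : List Char) (d : Char) (hk : pvOkKey kc) : pvOkKey (kc ++ ['\\', d]) := by
  intro m cur
  have := hk ('\\' :: d :: m) cur
  simp only [List.append_assoc] at *
  rw [show ['\\', d] ++ m = '\\' :: d :: m from rfl, this]
  simp [pvSplitLoop]

theorem pvKeyStep_closed (tk : PySem.Set String) (kc : List Char) (hk : pvOkKey kc) :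
    pvKeyStep tk kc = tk := by
  have h := hk [] []
  simp only [List.append_nil, List.nil_append] at h
  simp [pvKeyStep, pvSplitUnescaped, h, pvSplitLoop]

theorem pvKeyStep_closed_bs (tk : PySem.Set String) (kc : List Char) (hk : pvOkKey kc) :
    pvKeyStep tk (kc ++ ['\\']) = tk := by
  have h := hk ['\\'] []
  simp only [List.nil_append] at h
  simp [pvKeyStep, pvSplitUnescaped, h, pvSplitLoop]

theorem pvKeyStep_eq (tk : PySem.Set String) (kc : List Char) (m : List Char) (hk : pvOkKey kc) :
    pvKeyStep tk (kc ++ '=' :: m) = PySem.Set.add tk (pvUnescapeIfNeeded (String.ofList kc)) := by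
  have h := hk ('=' :: m) []
  simp only [List.nil_append] at h
  obtain ⟨h0, t0, hw⟩ := pvSplitLoop_shape '=' m false
  simp [pvKeyStep, pvSplitUnescaped, h, pvSplitLoop, hw]

-- the master invariant: A's loop, started in the measurement / tag-key / tag-value state,
-- computes what B computes on the comma-segments of the before-space prefix
theorem pvMain : ∀ (n : Nat) (l : List Char), l.length ≤ n →
    ∀ (h : List Char) (t : List (List Char)), pvC l = h :: t →
    ∀ (mc : List Char) (tk : PySem.Set String) (kc : List Char),
    (pvALoop l false false false mc tk [] = (mc ++ h, t.foldl pvKeyStep tk))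
    ∧ (pvOkKey kc → pvALoop l false true false mc tk kc = (mc, ((kc ++ h) :: t).foldl pvKeyStep tk))
    ∧ (pvALoop l false false true mc tk kc = (mc, t.foldl pvKeyStep tk)) := by
  intro n
  induction n with
  | zero =>
    intro l hl h t hC mc tk kc
    have : l = [] := List.length_eq_zero_iff.mp (Nat.le_zero.mp hl)
    subst this
    obtain ⟨rfl, rfl⟩ : h = [] ∧ t = ([] : List (List Char)) := by
      have := pvC_nil; rw [this] at hC; simpa using hC.symm
    refine ⟨by simp [pvALoop], fun hk => ?_, by simp [pvALoop]⟩
    simp [pvALoop, pvKeyStep_closed tk kc hk]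
  | succ n ih =>
    intro l hl h t hC mc tk kc
    match l with
    | [] =>
      obtain ⟨rfl, rfl⟩ : h = [] ∧ t = ([] : List (List Char)) := by
        have := pvC_nil; rw [this] at hC; simpa using hC.symm
      refine ⟨by simp [pvALoop], fun hk => ?_, by simp [pvALoop]⟩
      simp [pvALoop, pvKeyStep_closed tk kc hk]
    | c :: r =>
      have hrlen : r.length ≤ n := by simpa using Nat.lt_succ_iff.mp (by simpa using hl)
      by_cases hsp : c = ' '
      · subst hsp
        rw [pvC_space] at hC
        obtain ⟨rfl, rfl⟩ : h = [] ∧ t = ([] : List (List Char)) := by simpa using hC.symm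
        refine ⟨by simp [pvALoop], fun hk => ?_, by simp [pvALoop]⟩
        simp [pvALoop, pvKeyStep_closed tk kc hk]
      · by_cases hcm : c = ','
        · subst hcm
          obtain ⟨hr, tr, hCr⟩ := pvC_ne_nil r
          rw [pvC_comma, hCr] at hC
          obtain ⟨rfl, rfl⟩ : h = [] ∧ t = hr :: tr := by simpa using hC.symm
          refine ⟨?_, fun hk => ?_, ?_⟩
          · have := ((ih r hrlen hr tr hCr mc tk []).2.1) pvOkKey_nil
            simpa [pvALoop] using this
          · have := ((ih r hrlen hr tr hCr mc tk []).2.1) pvOkKey_nil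
            simpa [pvALoop, pvKeyStep_closed tk kc hk] using this
          · have := ((ih r hrlen hr tr hCr mc tk []).2.1) pvOkKey_nil
            simpa [pvALoop] using this
        · by_cases hbs : c = '\\'
          · subst hbs
            match r with
            | [] =>
              rw [pvC_bs_nil] at hC
              obtain ⟨rfl, rfl⟩ : h = ['\\'] ∧ t = ([] : List (List Char)) := by simpa using hC.symm
              refine ⟨by simp [pvALoop], fun hk => ?_, by simp [pvALoop]⟩
              simp [pvALoop, pvKeyStep_closed_bs tk kc hk]
            | d :: r' =>
              have hr'len : r'.length ≤ n := by simp at hl; omega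
              obtain ⟨hr, tr, hCr⟩ := pvC_ne_nil r'
              rw [pvC_bs d r' hr tr hCr] at hC
              obtain ⟨rfl, rfl⟩ : h = '\\' :: d :: hr ∧ t = tr := by simpa using hC.symm
              refine ⟨?_, fun hk => ?_, ?_⟩
              · have := (ih r' hr'len hr t hCr (mc ++ ['\\', d]) tk []).1
                simpa [pvALoop] using this
              · have := ((ih r' hr'len hr t hCr mc tk (kc ++ ['\\', d])).2.1)
                  (pvOkKey_bs kc d hk)
                simpa [pvALoop] using this
              · have := (ih r' hr'len hr t hCr mc tk kc).2.2
                simpa [pvALoop] using this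
          · -- ordinary character (includes '=')
            obtain ⟨hr, tr, hCr⟩ := pvC_ne_nil r
            rw [pvC_char c r hr tr hbs hsp hcm hCr] at hC
            obtain ⟨rfl, rfl⟩ : h = c :: hr ∧ t = tr := by simpa using hC.symm
            by_cases heq : c = '='
            · subst heq
              refine ⟨?_, fun hk => ?_, ?_⟩
              · have := (ih r hrlen hr t hCr (mc ++ ['=']) tk []).1
                simpa [pvALoop, hsp, hcm] using this
              · have := (ih r hrlen hr t hCr mc
                  (PySem.Set.add tk (pvUnescapeIfNeeded (String.ofList kc))) kc).2.2
                rw [show ((kc ++ '=' :: hr) :: t).foldl pvKeyStep tk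
                    = t.foldl pvKeyStep (pvKeyStep tk (kc ++ '=' :: hr)) from rfl,
                  pvKeyStep_eq tk kc hr hk]
                simpa [pvALoop, hsp, hcm] using this
              · have := (ih r hrlen hr t hCr mc tk kc).2.2
                simpa [pvALoop, hsp, hcm] using this
            · refine ⟨?_, fun hk => ?_, ?_⟩
              · have := (ih r hrlen hr t hCr (mc ++ [c]) tk []).1
                simpa [pvALoop, hsp, hcm, hbs, heq] using this
              · have := ((ih r hrlen hr t hCr mc tk (kc ++ [c])).2.1)
                  (pvOkKey_snoc kc c hbs heq hk)
                simpa [pvALoop, hsp, hcm, hbs, heq] using this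
              · have := (ih r hrlen hr t hCr mc tk kc).2.2
                simpa [pvALoop, hsp, hcm, hbs, heq] using this

-- ===== VERDICT (by name: the statement is the Claim_ definition above) =====
theorem extract_measurement_and_tag_keys_py_spec : Claim_equal_extract_measurement_and_tag_keys_py := by
  intro line _
  unfold Spec_extract_measurement_and_tag_keys_py
  unfold extract_measurement_and_tag_keys_py extract_measurement_and_tag_keys_py_alt
  by_cases hm : pvIsMetadataLine line = true
  · simp [hm]
  · obtain ⟨h, t, hC⟩ := pvC_ne_nil line.toList
    have hmain := (pvMain line.toList.length line.toList le_rfl h t hC [] PySem.Set.empty []).1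
    have hCe : pvSplitUnescaped ',' (pvTakeLoop line.toList false []) = h :: t := hC
    simp only [hm, if_false, Bool.false_eq_true, hCe, hmain, List.nil_append]
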